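-- pv_equiv track=rewrite | github.com/pokerdio/generic | Arduino/bluetooth_repl_esp32/ed.py | valid_txt_range
-- ===== SOURCE A (Python) =====
-- def valid_txt_range(s):
--     if not s:
--         return True
--     try:
--         ret = int(s)
--     except:
--         v = s.split(":")
--         if (len(v) != 2):
--             return False
--         return valid_txt_range(v[0]) and valid_txt_range(v[1])
--     return True
-- ===== SOURCE B (Python) =====
-- def _is_int(p):
--     try:
--         int(p)
--         return True
--     except:
--         return False
--
--
-- def valid_txt_range(s):
--     if s and not _is_int(s):
--         parts = s.split(":")
--         if len(parts) != 2:
--             return False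
--         for p in parts:
--             if p and not _is_int(p):
--                 return False
--     return True
-- ===== Notes on version B (the rewrite author's own statement) =====
-- stated objective: simpler
-- what changed: Recursive validation replaced by a flat non-recursive version: an extracted _is_int predicate, one split, and a single loop over the two parts with a single trailing return True.
import Mathlib
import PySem

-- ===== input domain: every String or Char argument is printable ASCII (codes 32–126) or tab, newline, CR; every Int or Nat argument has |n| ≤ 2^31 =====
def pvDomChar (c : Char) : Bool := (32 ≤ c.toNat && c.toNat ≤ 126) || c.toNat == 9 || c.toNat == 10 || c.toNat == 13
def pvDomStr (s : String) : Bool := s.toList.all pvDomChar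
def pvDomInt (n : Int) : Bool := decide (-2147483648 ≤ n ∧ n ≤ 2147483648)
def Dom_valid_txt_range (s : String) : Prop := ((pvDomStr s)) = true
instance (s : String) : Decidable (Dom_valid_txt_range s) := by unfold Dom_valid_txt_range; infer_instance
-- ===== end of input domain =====

-- B replaces A's self-recursion by a flat decomposition: an extracted integer-test
-- predicate, one split, and a single loop over the two parts (objective: simpler).

-- ===== PORT A =====
-- fueled transliteration of A's recursion; fuel = |s| + 1 always suffices (the
-- recursive calls are on strict substrings), so the 0-fuel clause is unreachable
def vtrA : Nat → String → Bool
  | 0, _ => false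
  | fuel + 1, s =>
    if s = "" then true
    else
      match PySem.Int.ofStr? s with
      | some _ => true
      | none =>
        match (PySem.Str.split? s ":").getD [] with   -- sep ≠ "" so split? is `some`
        | [a, b] => vtrA fuel a && vtrA fuel b
        | _ => false

def valid_txt_range (s : String) : Bool := vtrA (s.toList.length + 1) s

-- ===== PORT B =====
def pvIsInt (p : String) : Bool := (PySem.Int.ofStr? p).isSome

def valid_txt_range_alt (s : String) : Bool :=
  if s ≠ "" && !pvIsInt s then
    let parts := (PySem.Str.split? s ":").getD []    -- sep ≠ "" so split? is `some`
    if parts.length ≠ 2 then false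
    else parts.all (fun p => !(p ≠ "" && !pvIsInt p))
  else true

-- ===== PRECONDITION & SPEC =====
def Spec_valid_txt_range (s : String) (out : Bool) : Prop := out = valid_txt_range_alt s
instance (s : String) (out : Bool) : Decidable (Spec_valid_txt_range s out) := by unfold Spec_valid_txt_range; infer_instance

-- ===== CLAIM (what is proved, stated in full; the proofs are below) =====
def Claim_equal_valid_txt_range : Prop := ∀ (s : String), Dom_valid_txt_range s → Spec_valid_txt_range s (valid_txt_range s)

-- ===== LEMMAS AND PROOFS =====

-- reference splitter: what `PySem.Chars.splitOn cs [':']` computes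
def splitC : List Char → List (List Char)
  | [] => [[]]
  | c :: rest => if c = ':' then [] :: splitC rest else (splitC rest).modifyHead (c :: ·)

theorem splitC_ne_nil (cs : List Char) : splitC cs ≠ [] := by
  induction cs with
  | nil => simp [splitC]
  | cons c rest ih =>
    simp only [splitC]
    split
    · simp
    · cases h : splitC rest with
      | nil => exact absurd h ih
      | cons p ps => simp [List.modifyHead]

theorem splitOn_go_eq (l : List Char) : ∀ (fuel : Nat) (cur : List Char) (acc : List (List Char)),
    l.length < fuel →
    PySem.Chars.splitOn.go [':'] fuel l cur acc
      = acc.reverse ++ (splitC l).modifyHead (cur.reverse ++ ·) := by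
  induction l with
  | nil =>
    intro fuel cur acc h
    match fuel, h with
    | fuel + 1, _ => simp [PySem.Chars.splitOn.go, splitC, List.modifyHead]
  | cons c rest ih =>
    intro fuel cur acc h
    match fuel, h with
    | fuel + 1, h =>
      have hlt : rest.length < fuel := by simpa using Nat.lt_of_succ_lt_succ h
      by_cases hc : c = ':'
      · subst hc
        have hpre : [':'].isPrefixOf (':' :: rest) = true := by
          simp [List.isPrefixOf]
        simp only [PySem.Chars.splitOn.go, hpre, splitC]
        rw [show List.drop [':'].length (':' :: rest) = rest from rfl, ih fuel [] (cur.reverse :: acc) hlt]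
        cases splitC rest <;> simp [List.modifyHead]
      · have hpre : [':'].isPrefixOf (c :: rest) = false := by
          simp [List.isPrefixOf]
          exact fun h' => absurd h'.symm hc
        simp only [PySem.Chars.splitOn.go, hpre, splitC, if_neg hc]
        rw [ih fuel (c :: cur) acc hlt]
        cases h2 : splitC rest with
        | nil => exact absurd h2 (splitC_ne_nil rest)
        | cons p ps => simp [List.modifyHead]

theorem splitOn_eq_splitC (cs : List Char) : PySem.Chars.splitOn cs [':'] = splitC cs := by
  unfold PySem.Chars.splitOn
  rw [splitOn_go_eq cs (cs.length + 1) [] [] (Nat.lt_succ_self _)]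
  cases h : splitC cs with
  | nil => exact absurd h (splitC_ne_nil cs)
  | cons p ps => simp [List.modifyHead]

theorem splitC_no_colon (cs : List Char) : ∀ p ∈ splitC cs, ':' ∉ p := by
  induction cs with
  | nil => simp [splitC]
  | cons c rest ih =>
    simp only [splitC]
    split
    · intro p hp
      rcases List.mem_cons.mp hp with hp | hp
      · simp [hp]
      · exact ih p hp
    · cases h2 : splitC rest with
      | nil => exact absurd h2 (splitC_ne_nil rest)
      | cons q qs =>
        intro p hp
        rcases List.mem_cons.mp (by simpa [List.modifyHead] using hp) with hp | hp
        · subst hp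
          have hq : ':' ∉ q := ih q (by simp [h2])
          simp only [List.mem_cons]
          rintro (h | h)
          · exact ‹¬ c = ':'› h.symm
          · exact hq h
        · exact ih p (by simp [h2, hp])

theorem splitC_single (cs : List Char) (h : ':' ∉ cs) : splitC cs = [cs] := by
  induction cs with
  | nil => rfl
  | cons c rest ih =>
    have hc : ¬ c = ':' := fun hc => h (by simp [hc])
    have hr := ih (fun hm => h (List.mem_cons_of_mem _ hm))
    simp [splitC, hc, hr, List.modifyHead]

theorem str_split_colon (s : String) :
    (PySem.Str.split? s ":").getD [] = (splitC s.toList).map String.ofList := by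
  rw [PySem.Str.split?.eq_1]
  simp [PySem.Chars.split?, splitOn_eq_splitC]

theorem ofList_eq_empty_iff (l : List Char) : (String.ofList l = "") ↔ l = [] := by
  constructor
  · intro h
    have : (String.ofList l).toList = ("" : String).toList := by rw [h]
    simpa using this
  · intro h; simp [h]

-- on a colon-free string, one unfolding of A's recursion yields "empty or int"
theorem vtrA_no_colon (fuel : Nat) (l : List Char) (h : ':' ∉ l) :
    vtrA (fuel + 1) (String.ofList l) = (decide (l = []) || (PySem.Int.ofChars? l).isSome) := by
  simp only [vtrA]
  by_cases he : l = []
  · simp [he]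
  · rw [if_neg (fun hc => he ((ofList_eq_empty_iff l).mp hc))]
    rw [PySem.Int.ofStr?_ofList]
    cases hi : PySem.Int.ofChars? l with
    | some n => simp [he]
    | none =>
      rw [str_split_colon]
      simp [splitC_single _ (by simpa using h), he]

theorem main_eq (s : String) : valid_txt_range s = valid_txt_range_alt s := by
  unfold valid_txt_range valid_txt_range_alt
  by_cases he : s = ""
  · subst he; rfl
  · by_cases hi : pvIsInt s = true
    · -- int(s) succeeds: A's `some` branch, B's guard is false
      obtain ⟨n, hn⟩ := Option.isSome_iff_exists.mp hi
      obtain ⟨c, cs, hcs⟩ : ∃ c cs, s.toList = c :: cs := by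
        cases h : s.toList with
        | nil => exact absurd (by apply String.ext; simpa using h) he
        | cons c cs => exact ⟨c, cs, rfl⟩
      simp [vtrA, he, hn, pvIsInt]
    · -- int(s) fails: both go through the split
      have hi' : PySem.Int.ofStr? s = none := by
        cases h : PySem.Int.ofStr? s with
        | none => rfl
        | some n => exact absurd (by simp [pvIsInt, h]) hi
      obtain ⟨c, cs, hcs⟩ : ∃ c cs, s.toList = c :: cs := by
        cases h : s.toList with
        | nil => exact absurd (by apply String.ext; simpa using h) he
        | cons c cs => exact ⟨c, cs, rfl⟩
      have hguard : (s ≠ "" && !pvIsInt s) = true := by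
        simp [he, hi]
      rw [hguard, if_pos rfl]
      rw [hcs]
      simp only [vtrA, if_neg he, hi']
      rw [str_split_colon, hcs]
      have hnc := splitC_no_colon (c :: cs)
      cases h2 : splitC (c :: cs) with
      | nil => exact absurd h2 (splitC_ne_nil _)
      | cons p ps =>
        cases ps with
        | nil => simp
        | cons q qs =>
          cases qs with
          | nil =>
            -- exactly two parts
            have hp : ':' ∉ p := hnc p (by simp [h2])
            have hq : ':' ∉ q := hnc q (by simp [h2])
            simp only [List.map, List.length, List.all]
            rw [vtrA_no_colon _ p hp, vtrA_no_colon _ q hq]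
            by_cases hpe : p = [] <;> by_cases hqe : q = [] <;>
              simp [hpe, hqe, pvIsInt, PySem.Int.ofStr?_ofList]
          | cons r rs => simp

-- ===== VERDICT (by name: the statement is the Claim_ definition above) =====
theorem valid_txt_range_spec : Claim_equal_valid_txt_range := by
  intro s _
  unfold Spec_valid_txt_range
  exact main_eq s
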